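-- pv_equiv track=rewrite | github.com/khnhenriette/ProjectADL | scripts/new_knowns_dataset_gen.py | to_natural_language_with_subject
-- ===== SOURCE A (Python) =====
-- def to_natural_language_with_subject(prompt):
--     if prompt is None:  # Handle NoneType values
--         return ""
--
--     operator_mapping = {
--         '+': 'plus',
--         '-': 'minus',
--         '*': 'times',
--         '/': 'divided by',
--         '=': 'equals'
--     }
--
--     # Replace operators with words
--     for operator, word in operator_mapping.items():
--         prompt = prompt.replace(operator, f" {word} ")
--
--     # Remove parentheses and trailing ".0" (only for decimals)
--     prompt = prompt.replace('(', '').replace(')', '').strip()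
--     prompt = ' '.join(
--         word[:-2] if word.endswith('.0') and word[:-2].isdigit() else word
--         for word in prompt.split()
--     )
--     return prompt
-- ===== SOURCE B (Python) =====
-- def to_natural_language_with_subject(prompt):
--     # Single left-to-right scan emitting words directly (no repeated full-string replace passes).
--     if prompt is None:
--         return ""
--     op = {'+': ['plus'], '-': ['minus'], '*': ['times'],
--           '/': ['divided', 'by'], '=': ['equals']}
--     words = []
--     cur = []
--     for ch in prompt:
--         if ch in op:
--             if cur:
--                 words.append(''.join(cur))
--                 cur = []
--             words.extend(op[ch])
--         elif ch in '()':
--             continue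
--         elif ch.isspace():
--             if cur:
--                 words.append(''.join(cur))
--                 cur = []
--         else:
--             cur.append(ch)
--     if cur:
--         words.append(''.join(cur))
--     return ' '.join(
--         w[:-2] if w.endswith('.0') and w[:-2].isdigit() else w
--         for w in words
--     )
-- ===== Notes on version B (the rewrite author's own statement) =====
-- stated objective: alternative
-- what changed: A rewrites the whole string seven times (five operator replace passes, two parenthesis-removal passes) and then splits; B makes one left-to-right scan over the characters, emitting the accumulated word, the operator's words, or nothing (parentheses) as it goes, and applies the trailing-decimal-zero trim per word at the end.
import Mathlib
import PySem

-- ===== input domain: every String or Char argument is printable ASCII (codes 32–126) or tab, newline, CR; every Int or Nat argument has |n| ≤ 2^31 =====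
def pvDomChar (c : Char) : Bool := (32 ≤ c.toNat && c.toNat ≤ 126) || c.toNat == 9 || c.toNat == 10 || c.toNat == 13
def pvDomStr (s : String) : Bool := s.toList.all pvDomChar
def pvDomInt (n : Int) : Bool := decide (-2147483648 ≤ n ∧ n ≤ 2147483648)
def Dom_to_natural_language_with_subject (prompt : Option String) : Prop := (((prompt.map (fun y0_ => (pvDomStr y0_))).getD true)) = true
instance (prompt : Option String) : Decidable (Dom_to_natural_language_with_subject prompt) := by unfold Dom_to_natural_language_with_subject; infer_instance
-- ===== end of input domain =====

-- B replaces A's seven full-string replace passes by a single left-to-right scan that emits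
-- words directly (objective: alternative single-pass decomposition; same asymptotic cost).

-- ===== PORT A =====
-- word[:-2] if word.endswith('.0') and word[:-2].isdigit() else word
def pvTrimWordA (w : String) : String :=
  if PySem.Str.endswith w ".0" && PySem.Str.strIsdigit (PySem.Str.slice w none (some (-2))) then
    PySem.Str.slice w none (some (-2))
  else w

def to_natural_language_with_subject (prompt : Option String) : String :=
  match prompt with
  | none => ""
  | some p0 =>
    let p1 := PySem.Str.replace p0 "+" " plus "
    let p2 := PySem.Str.replace p1 "-" " minus "
    let p3 := PySem.Str.replace p2 "*" " times "
    let p4 := PySem.Str.replace p3 "/" " divided by "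
    let p5 := PySem.Str.replace p4 "=" " equals "
    let p6 := PySem.Str.strip (PySem.Str.replace (PySem.Str.replace p5 "(" "") ")" "")
    PySem.Str.join " " ((PySem.Str.split₀ p6).map pvTrimWordA)

-- ===== PORT B =====
-- op[ch] lookup of Source B
def pvOpWords (c : Char) : Option (List String) :=
  if c = '+' then some ["plus"]
  else if c = '-' then some ["minus"]
  else if c = '*' then some ["times"]
  else if c = '/' then some ["divided", "by"]
  else if c = '=' then some ["equals"]
  else none

-- the body of Source B's for-loop; state = (words, cur)
def pvStepB (st : List String × List Char) (ch : Char) : List String × List Char :=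
  match pvOpWords ch with
  | some ops => ((if st.2.isEmpty then st.1 else st.1 ++ [String.ofList st.2]) ++ ops, [])
  | none =>
    if ch = '(' || ch = ')' then st
    else if PySem.Chars.isspace ch then
      (if st.2.isEmpty then st.1 else st.1 ++ [String.ofList st.2], [])
    else (st.1, st.2 ++ [ch])

-- w[:-2] if w.endswith('.0') and w[:-2].isdigit() else w
def pvTrimWordB (w : String) : String :=
  if PySem.Str.endswith w ".0" && PySem.Str.strIsdigit (PySem.Str.slice w none (some (-2))) then
    PySem.Str.slice w none (some (-2))
  else w

def to_natural_language_with_subject_alt (prompt : Option String) : String :=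
  match prompt with
  | none => ""
  | some p =>
    let st := p.toList.foldl pvStepB ([], [])
    let words := if st.2.isEmpty then st.1 else st.1 ++ [String.ofList st.2]
    PySem.Str.join " " (words.map pvTrimWordB)

-- ===== PRECONDITION & SPEC =====
def Spec_to_natural_language_with_subject (prompt : Option String) (out : String) : Prop := out = to_natural_language_with_subject_alt prompt
instance (prompt : Option String) (out : String) : Decidable (Spec_to_natural_language_with_subject prompt out) := by unfold Spec_to_natural_language_with_subject; infer_instance

-- ===== CLAIM (what is proved, stated in full; the proofs are below) =====
def Claim_equal_to_natural_language_with_subject : Prop := ∀ (prompt : Option String), Dom_to_natural_language_with_subject prompt → Spec_to_natural_language_with_subject prompt (to_natural_language_with_subject prompt)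

-- ===== LEMMAS AND PROOFS =====

def pvE (c : Char) : List Char :=
  if c = '+' then (" plus ").toList
  else if c = '-' then (" minus ").toList
  else if c = '*' then (" times ").toList
  else if c = '/' then (" divided by ").toList
  else if c = '=' then (" equals ").toList
  else if c = '(' || c = ')' then []
  else [c]


def pvWordsAux : List Char → List Char → List (List Char)
  | [], cur => if cur.isEmpty then [] else [cur.reverse]
  | c :: rest, cur =>
    if PySem.Chars.isspace c then
      if cur.isEmpty then pvWordsAux rest [] else cur.reverse :: pvWordsAux rest []
    else pvWordsAux rest (c :: cur)


def pvBW : List Char → List Char → List String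
  | [], cur => if cur.isEmpty then [] else [String.ofList cur]
  | c :: rest, cur =>
    match pvOpWords c with
    | some ops => (if cur.isEmpty then [] else [String.ofList cur]) ++ ops ++ pvBW rest []
    | none =>
      if c = '(' || c = ')' then pvBW rest cur
      else if PySem.Chars.isspace c then
        (if cur.isEmpty then [] else [String.ofList cur]) ++ pvBW rest []
      else pvBW rest (cur ++ [c])

theorem pv_replace_go_single (o : Char) (new : List Char) (l : List Char) :
    ∀ (fuel : Nat) (acc : List Char), l.length ≤ fuel →
      PySem.Chars.replace.go [o] new fuel l acc
        = acc.reverse ++ l.flatMap (fun c => if c = o then new else [c]) := by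
  induction l with
  | nil => intro fuel acc h; cases fuel <;> simp [PySem.Chars.replace.go]
  | cons c t ih =>
    intro fuel acc h
    cases fuel with
    | zero => simp at h
    | succ n =>
      have ht : t.length ≤ n := by simpa using h
      rw [PySem.Chars.replace.go]
      by_cases hc : c = o
      · subst hc
        simp [List.isPrefixOf, ih n _ ht]
      · simp [List.isPrefixOf, hc, Ne.symm hc, ih n _ ht]

theorem pv_replace_single (l : List Char) (o : Char) (new : List Char) :
    PySem.Chars.replace l [o] new = l.flatMap (fun c => if c = o then new else [c]) := by
  rw [PySem.Chars.replace]
  simp [pv_replace_go_single o new l l.length [] le_rfl]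

theorem pv_split₀_go (l : List Char) : ∀ (cur : List Char) (acc : List (List Char)),
    PySem.Chars.split₀.go l cur acc = acc.reverse ++ pvWordsAux l cur := by
  induction l with
  | nil =>
    intro cur acc
    rw [PySem.Chars.split₀.go, pvWordsAux]
    by_cases hc : cur.isEmpty <;> simp [hc]
  | cons c t ih =>
    intro cur acc
    rw [PySem.Chars.split₀.go, pvWordsAux]
    by_cases hs : PySem.Chars.isspace c
    · by_cases hc : cur.isEmpty = true <;> simp [hs, hc, ih]
    · simp [hs, ih]

theorem pv_split₀_eq (s : List Char) : PySem.Chars.split₀ s = pvWordsAux s [] := by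
  rw [PySem.Chars.split₀]; simp [pv_split₀_go]

theorem pv_wordsAux_spaces (t : List Char) : ∀ (cur : List Char),
    (∀ c ∈ t, PySem.Chars.isspace c = true) →
    pvWordsAux t cur = if cur.isEmpty then [] else [cur.reverse] := by
  induction t with
  | nil => intro cur ht; rw [pvWordsAux]
  | cons c u ih =>
    intro cur ht
    rw [pvWordsAux]
    simp only [ht c (by simp)]
    by_cases hc : cur.isEmpty = true <;>
      simp [hc, ih [] (fun d hd => ht d (by simp [hd]))]

theorem pv_wordsAux_trailing (t : List Char) (ht : ∀ c ∈ t, PySem.Chars.isspace c = true)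
    (s : List Char) : ∀ (cur : List Char), pvWordsAux (s ++ t) cur = pvWordsAux s cur := by
  induction s with
  | nil =>
    intro cur
    simp only [List.nil_append]
    rw [pv_wordsAux_spaces t cur ht, pvWordsAux]
  | cons c s ihs =>
    intro cur
    rw [List.cons_append, pvWordsAux]
    conv_rhs => rw [pvWordsAux]
    by_cases hs : PySem.Chars.isspace c <;> by_cases hc : cur.isEmpty = true <;>
      simp [hs, hc, ihs]

theorem pv_wordsAux_lstrip (s : List Char) :
    pvWordsAux (List.dropWhile PySem.Chars.isspace s) [] = pvWordsAux s [] := by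
  induction s with
  | nil => simp
  | cons c t ih =>
    by_cases hs : PySem.Chars.isspace c
    · rw [List.dropWhile_cons_of_pos (by simpa using hs)]
      rw [ih]; conv_rhs => rw [pvWordsAux]
      simp [hs]
    · rw [List.dropWhile_cons_of_neg (by simpa using hs)]

theorem pv_split₀_strip (s : List Char) :
    PySem.Chars.split₀ (PySem.Chars.strip s) = PySem.Chars.split₀ s := by
  rw [pv_split₀_eq, pv_split₀_eq, PySem.Chars.strip, PySem.Chars.rstrip]
  set u := PySem.Chars.lstrip s with hu
  have h1 : u = (List.dropWhile PySem.Chars.isspace u.reverse).reverse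
      ++ (List.takeWhile PySem.Chars.isspace u.reverse).reverse := by
    rw [← List.reverse_append, List.takeWhile_append_dropWhile, List.reverse_reverse]
  have h2 : ∀ c ∈ (List.takeWhile PySem.Chars.isspace u.reverse).reverse,
      PySem.Chars.isspace c = true := by
    intro c hc
    exact List.mem_takeWhile_imp (by simpa using hc)
  calc pvWordsAux (List.dropWhile PySem.Chars.isspace u.reverse).reverse []
      = pvWordsAux ((List.dropWhile PySem.Chars.isspace u.reverse).reverse
          ++ (List.takeWhile PySem.Chars.isspace u.reverse).reverse) [] := by
        rw [pv_wordsAux_trailing _ h2 _ []]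
    _ = pvWordsAux u [] := by rw [← h1]
    _ = pvWordsAux s [] := by rw [hu, PySem.Chars.lstrip, pv_wordsAux_lstrip]

theorem pv_fold_eq (l : List Char) : ∀ (ws : List String) (cur : List Char),
    (let st := l.foldl pvStepB (ws, cur);
     if st.2.isEmpty then st.1 else st.1 ++ [String.ofList st.2]) = ws ++ pvBW l cur := by
  induction l with
  | nil => intro ws cur; rw [pvBW]; by_cases hc : cur.isEmpty = true <;> simp [hc]
  | cons c t ih =>
    intro ws cur
    rw [pvBW]
    simp only [List.foldl_cons]
    rcases hop : pvOpWords c with _ | ops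
    · rw [pvStepB]; simp only [hop]
      by_cases hp : (c = '(' || c = ')') = true
      · rw [if_pos hp, if_pos hp]; exact ih ws cur
      · rw [if_neg hp]
        by_cases hs : PySem.Chars.isspace c = true
        · rw [if_pos hs]
          have := ih (if cur.isEmpty then ws else ws ++ [String.ofList cur]) []
          simp only [this]
          by_cases hc : cur.isEmpty = true <;> simp [hp, hs, hc]
        · rw [if_neg hs]
          have := ih ws (cur ++ [c])
          simp only [this]
          simp [hp, hs]
    · rw [pvStepB]; simp only [hop]
      have := ih ((if cur.isEmpty then ws else ws ++ [String.ofList cur]) ++ ops) []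
      simp only [this]
      by_cases hc : cur.isEmpty = true <;> simp [hc]

theorem pv_wordsAux_word (w : List Char) (hw : w.all (fun c => !PySem.Chars.isspace c) = true) :
    ∀ (rest cur : List Char), pvWordsAux (w ++ rest) cur = pvWordsAux rest (w.reverse ++ cur) := by
  induction w with
  | nil => intro rest cur; simp
  | cons c u ih =>
    intro rest cur
    simp only [List.all_cons, Bool.and_eq_true, Bool.not_eq_true'] at hw
    rw [List.cons_append, pvWordsAux, if_neg (by simp [hw.1])]
    rw [ih hw.2 rest (c :: cur)]
    simp

theorem pv_wordsAux_space (c : Char) (hs : PySem.Chars.isspace c = true)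
    (rest cur : List Char) :
    pvWordsAux (c :: rest) cur
      = (if cur.isEmpty then [] else [cur.reverse]) ++ pvWordsAux rest [] := by
  rw [pvWordsAux, if_pos hs]
  by_cases hc : cur.isEmpty = true <;> simp [hc]


theorem pv_wordblock (w : List Char) (hw : w.all (fun c => !PySem.Chars.isspace c) = true)
    (hne : w.isEmpty = false) (rest : List Char) :
    pvWordsAux (w ++ ' ' :: rest) [] = w :: pvWordsAux rest [] := by
  rw [pv_wordsAux_word w hw]
  rw [List.append_nil, pv_wordsAux_space ' ' (by decide)]
  simp [List.isEmpty_eq_false_iff.mp hne]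

theorem pv_corr (l : List Char) : ∀ (cur : List Char),
    (pvWordsAux (l.flatMap pvE) cur.reverse).map String.ofList = pvBW l cur := by
  induction l with
  | nil =>
    intro cur
    by_cases hc : cur.isEmpty = true <;> simp [pvWordsAux, pvBW, hc]
  | cons c t ih =>
    intro cur
    have ih0 : (pvWordsAux (t.flatMap pvE) []).map String.ofList = pvBW t [] := by
      simpa using ih []
    rw [List.flatMap_cons, pvBW]
    rcases hop : pvOpWords c with _ | ops
    · simp only [hop]
      by_cases hp : (c = '(' || c = ')') = true
      · rw [if_pos hp]
        have he : pvE c = [] := by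
          simp only [Bool.or_eq_true, decide_eq_true_eq] at hp
          rcases hp with h | h <;> subst h <;> rfl
        rw [he, List.nil_append, ih cur]
      · rw [if_neg hp]
        have he : pvE c = [c] := by
          simp only [pvOpWords] at hop
          simp only [pvE]
          split_ifs at hop ⊢ <;> rfl
        by_cases hs : PySem.Chars.isspace c = true
        · rw [if_pos hs, he, List.singleton_append, pv_wordsAux_space c hs,
            List.map_append, ih0]
          by_cases hc : cur.isEmpty = true <;> simp [hc]
        · rw [if_neg hs, he, List.singleton_append, pvWordsAux, if_neg hs]
          have h2 : c :: cur.reverse = (cur ++ [c]).reverse := by simp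
          rw [h2, ih (cur ++ [c])]
    · -- operator character: pvE c is " word " (or " divided by ")
      simp only [hop]
      simp only [pvOpWords] at hop
      split_ifs at hop with h1 h2 h3 h4 h5
      all_goals (injection hop with hops; subst hops)
      · subst h1
        have he : pvE '+' ++ List.flatMap pvE t
            = ' ' :: (['p','l','u','s'] ++ ' ' :: List.flatMap pvE t) := by
          rw [pvE]; rfl
        rw [he, pv_wordsAux_space ' ' (by decide),
          pv_wordblock ['p','l','u','s'] (by decide) (by decide),
          List.map_append, List.map_cons, ih0]
        by_cases hc : cur.isEmpty = true <;> simp [hc]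
      · subst h2
        have he : pvE '-' ++ List.flatMap pvE t
            = ' ' :: (['m','i','n','u','s'] ++ ' ' :: List.flatMap pvE t) := by
          rw [pvE]; rfl
        rw [he, pv_wordsAux_space ' ' (by decide),
          pv_wordblock ['m','i','n','u','s'] (by decide) (by decide),
          List.map_append, List.map_cons, ih0]
        by_cases hc : cur.isEmpty = true <;> simp [hc]
      · subst h3
        have he : pvE '*' ++ List.flatMap pvE t
            = ' ' :: (['t','i','m','e','s'] ++ ' ' :: List.flatMap pvE t) := by
          rw [pvE]; rfl
        rw [he, pv_wordsAux_space ' ' (by decide),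
          pv_wordblock ['t','i','m','e','s'] (by decide) (by decide),
          List.map_append, List.map_cons, ih0]
        by_cases hc : cur.isEmpty = true <;> simp [hc]
      · subst h4
        have he : pvE '/' ++ List.flatMap pvE t
            = ' ' :: (['d','i','v','i','d','e','d'] ++ ' ' :: (['b','y'] ++ ' ' :: List.flatMap pvE t)) := by
          rw [pvE]; rfl
        rw [he, pv_wordsAux_space ' ' (by decide),
          pv_wordblock ['d','i','v','i','d','e','d'] (by decide) (by decide),
          pv_wordblock ['b','y'] (by decide) (by decide),
          List.map_append, List.map_cons, List.map_cons, ih0]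
        by_cases hc : cur.isEmpty = true <;> simp [hc]
      · subst h5
        have he : pvE '=' ++ List.flatMap pvE t
            = ' ' :: (['e','q','u','a','l','s'] ++ ' ' :: List.flatMap pvE t) := by
          rw [pvE]; rfl
        rw [he, pv_wordsAux_space ' ' (by decide),
          pv_wordblock ['e','q','u','a','l','s'] (by decide) (by decide),
          List.map_append, List.map_cons, ih0]
        by_cases hc : cur.isEmpty = true <;> simp [hc]


-- the seven replace passes of A expand each character independently
theorem pv_chain (p : List Char) :
    ((((((p.flatMap (fun c => if c = '+' then (" plus ").toList else [c])).flatMap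
        (fun c => if c = '-' then (" minus ").toList else [c])).flatMap
        (fun c => if c = '*' then (" times ").toList else [c])).flatMap
        (fun c => if c = '/' then (" divided by ").toList else [c])).flatMap
        (fun c => if c = '=' then (" equals ").toList else [c])).flatMap
        (fun c => if c = '(' then ([] : List Char) else [c])).flatMap
        (fun c => if c = ')' then ([] : List Char) else [c])
      = p.flatMap pvE := by
  rw [List.flatMap_assoc, List.flatMap_assoc, List.flatMap_assoc, List.flatMap_assoc,
    List.flatMap_assoc, List.flatMap_assoc]
  congr 1
  funext c
  by_cases h1 : c = '+'; · subst h1; rfl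
  by_cases h2 : c = '-'; · subst h2; rfl
  by_cases h3 : c = '*'; · subst h3; rfl
  by_cases h4 : c = '/'; · subst h4; rfl
  by_cases h5 : c = '='; · subst h5; rfl
  by_cases h6 : c = '('; · subst h6; rfl
  by_cases h7 : c = ')'; · subst h7; rfl
  simp [pvE, h1, h2, h3, h4, h5, h6, h7]

-- the word list A splits out equals the word list B scans out
theorem pv_words_eq (p : String) :
    PySem.Str.split₀ (PySem.Str.strip (PySem.Str.replace (PySem.Str.replace
        (PySem.Str.replace (PySem.Str.replace (PySem.Str.replace (PySem.Str.replace
          (PySem.Str.replace p "+" " plus ") "-" " minus ") "*" " times ")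
          "/" " divided by ") "=" " equals ") "(" "") ")" ""))
      = pvBW p.toList [] := by
  rw [PySem.Str.split₀]
  have hq : (PySem.Str.strip (PySem.Str.replace (PySem.Str.replace
      (PySem.Str.replace (PySem.Str.replace (PySem.Str.replace (PySem.Str.replace
        (PySem.Str.replace p "+" " plus ") "-" " minus ") "*" " times ")
        "/" " divided by ") "=" " equals ") "(" "") ")" "")).toList
      = PySem.Chars.strip (p.toList.flatMap pvE) := by
    rw [PySem.Str.toList_strip, PySem.Str.toList_replace, PySem.Str.toList_replace,
      PySem.Str.toList_replace, PySem.Str.toList_replace, PySem.Str.toList_replace,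
      PySem.Str.toList_replace, PySem.Str.toList_replace]
    rw [show ("+" : String).toList = ['+'] from rfl, show ("-" : String).toList = ['-'] from rfl,
      show ("*" : String).toList = ['*'] from rfl, show ("/" : String).toList = ['/'] from rfl,
      show ("=" : String).toList = ['='] from rfl, show ("(" : String).toList = ['('] from rfl,
      show (")" : String).toList = [')'] from rfl, show ("" : String).toList = [] from rfl]
    rw [pv_replace_single, pv_replace_single, pv_replace_single, pv_replace_single,
      pv_replace_single, pv_replace_single, pv_replace_single]
    rw [pv_chain]
  rw [hq, pv_split₀_strip, pv_split₀_eq]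
  have := pv_corr p.toList []
  simpa using this

-- ===== VERDICT (by name: the statement is the Claim_ definition above) =====
theorem to_natural_language_with_subject_spec : Claim_equal_to_natural_language_with_subject := by
  unfold Claim_equal_to_natural_language_with_subject
  intro prompt _
  unfold Spec_to_natural_language_with_subject
  cases prompt with
  | none => rfl
  | some p =>
    simp only [to_natural_language_with_subject, to_natural_language_with_subject_alt]
    have hb := pv_fold_eq p.toList [] []
    simp only [List.nil_append] at hb
    rw [hb, ← pv_words_eq p]
    have ht : pvTrimWordA = pvTrimWordB := by funext w; rfl
    rw [ht]
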